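-- pv_equiv track=rewrite | github.com/muherng/planning | diffuse/diag_gpt.py | diag_slices_from_delim
-- ===== SOURCE A (Python) =====
-- from typing import List, Tuple, Dict, Any
--
-- def diag_slices_from_delim(trace_ids: List[int], delim_id: int) -> List[Tuple[int,int]]:
--     """Return [(start,end), …] (end exclusive) for each diagonal."""
--     slices, start = [], 0
--     for i, tid in enumerate(trace_ids):
--         if tid == delim_id:
--             slices.append((start, i))
--             start = i + 1                  # skip the delimiter
--     slices.append((start, len(trace_ids)))
--     return slices
-- ===== SOURCE B (Python) =====
-- def diag_slices_from_delim(trace_ids, delim_id):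
--     """Return [(start,end), ...] (end exclusive) for each diagonal."""
--     positions = [i for i, tid in enumerate(trace_ids) if tid == delim_id]
--     bounds = [-1] + positions + [len(trace_ids)]
--     return [(bounds[k] + 1, bounds[k + 1]) for k in range(len(bounds) - 1)]
-- ===== Notes on version B (the rewrite author's own statement) =====
-- stated objective: alternative
-- what changed: Replaces the running-start accumulator loop with an index-then-pairwise decomposition: collect delimiter positions, frame them with -1/len sentinels, and pair consecutive boundaries into slices.
import Mathlib
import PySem

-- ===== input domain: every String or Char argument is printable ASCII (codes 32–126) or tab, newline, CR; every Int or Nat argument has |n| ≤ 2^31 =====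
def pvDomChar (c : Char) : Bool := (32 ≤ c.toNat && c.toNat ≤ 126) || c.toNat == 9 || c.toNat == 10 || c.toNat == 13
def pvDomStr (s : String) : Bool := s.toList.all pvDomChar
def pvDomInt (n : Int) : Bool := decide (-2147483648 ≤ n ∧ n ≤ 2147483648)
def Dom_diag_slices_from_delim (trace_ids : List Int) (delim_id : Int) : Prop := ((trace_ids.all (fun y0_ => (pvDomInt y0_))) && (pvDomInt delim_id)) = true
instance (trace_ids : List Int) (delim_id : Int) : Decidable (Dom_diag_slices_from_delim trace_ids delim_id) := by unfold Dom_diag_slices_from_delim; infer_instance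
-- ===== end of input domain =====

-- B replaces A's running-start accumulator loop with delimiter positions + sentinel bounds + pairwise windows (alternative decomposition, same cost).

-- ===== PORT A =====
-- loop with state (slices, start), then the trailing slice
def diag_slices_from_delim (trace_ids : List Int) (delim_id : Int) : List (Int × Int) :=
  let st := (PySem.List.enumerate trace_ids).foldl
    (fun (acc : List (Int × Int) × Int) (p : Int × Int) =>
      if p.2 = delim_id then (acc.1 ++ [(acc.2, p.1)], p.1 + 1) else acc)
    ([], 0)
  st.1 ++ [(st.2, (trace_ids.length : Int))]

-- ===== PORT B =====
def diag_slices_from_delim_alt (trace_ids : List Int) (delim_id : Int) : List (Int × Int) :=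
  let positions := (PySem.List.enumerate trace_ids).filterMap
    (fun p => if p.2 = delim_id then some p.1 else none)
  let bounds := (-1 : Int) :: (positions ++ [(trace_ids.length : Int)])
  (bounds.zip bounds.tail).map (fun q => (q.1 + 1, q.2))

-- ===== PRECONDITION & SPEC =====
def Spec_diag_slices_from_delim (trace_ids : List Int) (delim_id : Int) (out : List (Int × Int)) : Prop := out = diag_slices_from_delim_alt trace_ids delim_id
instance (trace_ids : List Int) (delim_id : Int) (out : List (Int × Int)) : Decidable (Spec_diag_slices_from_delim trace_ids delim_id out) := by unfold Spec_diag_slices_from_delim; infer_instance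

-- ===== CLAIM (what is proved, stated in full; the proofs are below) =====
def Claim_equal_diag_slices_from_delim : Prop := ∀ (trace_ids : List Int) (delim_id : Int), Dom_diag_slices_from_delim trace_ids delim_id → Spec_diag_slices_from_delim trace_ids delim_id (diag_slices_from_delim trace_ids delim_id)

-- ===== LEMMAS AND PROOFS =====

-- common reference shape: slices of xs with indices starting at pos, current slice began at start
def pvG : List Int → Int → Int → Int → List (Int × Int)
  | [], _, pos, start => [(start, pos)]
  | x :: xs, d, pos, start =>
      if x = d then (start, pos) :: pvG xs d (pos + 1) (pos + 1)
      else pvG xs d (pos + 1) start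

theorem lemA (d : Int) : ∀ (xs : List Int) (pos start : Int) (acc : List (Int × Int)),
    (let st := (PySem.List.enumerate xs pos).foldl
        (fun (acc : List (Int × Int) × Int) (p : Int × Int) =>
          if p.2 = d then (acc.1 ++ [(acc.2, p.1)], p.1 + 1) else acc)
        (acc, start);
     st.1 ++ [(st.2, pos + xs.length)]) = acc ++ pvG xs d pos start := by
  intro xs
  induction xs with
  | nil => intro pos start acc; simp [PySem.List.enumerate_nil, pvG]
  | cons x xs ih =>
    intro pos start acc
    simp only [PySem.List.enumerate_cons, List.foldl_cons, pvG, List.length_cons]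
    by_cases h : x = d
    · simp only [h, if_pos]
      have := ih (pos + 1) (pos + 1) (acc ++ [(start, pos)])
      push_cast
      rw [show pos + (↑xs.length + 1) = (pos + 1) + ↑xs.length by ring]
      simpa using this
    · simp only [if_neg h]
      have := ih (pos + 1) start acc
      push_cast
      rw [show pos + (↑xs.length + 1) = (pos + 1) + ↑xs.length by ring]
      simpa using this

theorem lemB (d : Int) : ∀ (xs : List Int) (pos b : Int),
    (let positions := (PySem.List.enumerate xs pos).filterMap
        (fun p => if p.2 = d then some p.1 else none);
     let bounds := b :: (positions ++ [pos + xs.length]);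
     (bounds.zip bounds.tail).map (fun q => (q.1 + 1, q.2))) = pvG xs d pos (b + 1) := by
  intro xs
  induction xs with
  | nil => intro pos b; simp [PySem.List.enumerate_nil, pvG]
  | cons x xs ih =>
    intro pos b
    simp only [PySem.List.enumerate_cons, List.filterMap_cons, pvG, List.length_cons]
    by_cases h : x = d
    · simp only [h, if_pos]
      have := ih (pos + 1) pos
      push_cast
      rw [show pos + (↑xs.length + 1) = (pos + 1) + ↑xs.length by ring]
      simp only [List.cons_append, List.zip_cons_cons, List.tail_cons, List.map_cons] at *
      simpa using this
    · simp only [if_neg h]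
      have := ih (pos + 1) b
      push_cast
      rw [show pos + (↑xs.length + 1) = (pos + 1) + ↑xs.length by ring]
      simpa using this

-- ===== VERDICT (by name: the statement is the Claim_ definition above) =====
theorem diag_slices_from_delim_spec : Claim_equal_diag_slices_from_delim := by
  intro t d _
  unfold Spec_diag_slices_from_delim diag_slices_from_delim diag_slices_from_delim_alt
  have hA := lemA d t 0 0 []
  have hB := lemB d t 0 (-1)
  simp only [zero_add] at hA
  simp only [zero_add] at hB
  simp only [List.nil_append] at hA
  rw [hA]
  rw [show ((-1 : Int) + 1) = 0 by ring] at hB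
  exact hB.symm
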